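-- pv_equiv track=rewrite | github.com/zacharyyahn/DukeREU | search_for_keywords.py | lookup_word
-- ===== SOURCE A (Python) =====
-- lookup = {
--     "Destruction":["crashed", "crash", "collided"],
--     "Fire":["fire", "fires"],
--     "Laceration":["laceration", "cut", "lacerated", "cutting"],
--     "Electrical shock":["electrical", "shock", "shocked"],
--     "Tendon/ligament/muscle":["ankle", "fell", "ankles", "disclocated", "twisted", "strain", "strained", "dislocated", "dislocation"],
--     "Optical Damage":["eye", "eyes", "eyelid", "eyelids", "shin", "shins"],
--     "Skeletal Injury":["broke", "fractured", "broken", "fracture"],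
--     "Crushed Appendage":["pinched", "jammed", "crushed", "crushing", "caught", "slammed", "dropped", "smashed"],
--     "Burn":["burn", "burns", "burned"],
--     "Head Blow":["face", "head", "concussion", "concussed", "slipped", "tripped"],
--     "Appendage Blow":["contusion", "tissue"],
--     "Other Health":[],
--     "Human Damage":[],
-- }
--
-- def lookup_word(word):
--     found_one = False
--     the_word = ""
--     for key in lookup:
--         if word in lookup[key] and not found_one:
--             found_one = True
--             the_word = key
--         elif word in lookup[key] and found_one:
--             the_word = "MANUAL_ENTRY"
--             break
--     return the_word
-- ===== SOURCE B (Python) =====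
-- PAIRS = [
--     ('crashed', 'Destruction'),
--     ('crash', 'Destruction'),
--     ('collided', 'Destruction'),
--     ('fire', 'Fire'),
--     ('fires', 'Fire'),
--     ('laceration', 'Laceration'),
--     ('cut', 'Laceration'),
--     ('lacerated', 'Laceration'),
--     ('cutting', 'Laceration'),
--     ('electrical', 'Electrical shock'),
--     ('shock', 'Electrical shock'),
--     ('shocked', 'Electrical shock'),
--     ('ankle', 'Tendon/ligament/muscle'),
--     ('fell', 'Tendon/ligament/muscle'),
--     ('ankles', 'Tendon/ligament/muscle'),
--     ('disclocated', 'Tendon/ligament/muscle'),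
--     ('twisted', 'Tendon/ligament/muscle'),
--     ('strain', 'Tendon/ligament/muscle'),
--     ('strained', 'Tendon/ligament/muscle'),
--     ('dislocated', 'Tendon/ligament/muscle'),
--     ('dislocation', 'Tendon/ligament/muscle'),
--     ('eye', 'Optical Damage'),
--     ('eyes', 'Optical Damage'),
--     ('eyelid', 'Optical Damage'),
--     ('eyelids', 'Optical Damage'),
--     ('shin', 'Optical Damage'),
--     ('shins', 'Optical Damage'),
--     ('broke', 'Skeletal Injury'),
--     ('fractured', 'Skeletal Injury'),
--     ('broken', 'Skeletal Injury'),
--     ('fracture', 'Skeletal Injury'),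
--     ('pinched', 'Crushed Appendage'),
--     ('jammed', 'Crushed Appendage'),
--     ('crushed', 'Crushed Appendage'),
--     ('crushing', 'Crushed Appendage'),
--     ('caught', 'Crushed Appendage'),
--     ('slammed', 'Crushed Appendage'),
--     ('dropped', 'Crushed Appendage'),
--     ('smashed', 'Crushed Appendage'),
--     ('burn', 'Burn'),
--     ('burns', 'Burn'),
--     ('burned', 'Burn'),
--     ('face', 'Head Blow'),
--     ('head', 'Head Blow'),
--     ('concussion', 'Head Blow'),
--     ('concussed', 'Head Blow'),
--     ('slipped', 'Head Blow'),
--     ('tripped', 'Head Blow'),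
--     ('contusion', 'Appendage Blow'),
--     ('tissue', 'Appendage Blow'),
-- ]
--
-- def lookup_word(word):
--     cats = [c for w, c in PAIRS if w == word]
--     if not cats:
--         return ""
--     if len(cats) == 1:
--         return cats[0]
--     return "MANUAL_ENTRY"
-- ===== Notes on version B (the rewrite author's own statement) =====
-- stated objective: alternative
-- what changed: Replaced A's stateful scan over a dict-of-lists (found_one flag plus early break) by a flat (keyword, category) pair table filtered in one comprehension, with the number of matching pairs deciding between the empty string, the category, or MANUAL_ENTRY.
import Mathlib
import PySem

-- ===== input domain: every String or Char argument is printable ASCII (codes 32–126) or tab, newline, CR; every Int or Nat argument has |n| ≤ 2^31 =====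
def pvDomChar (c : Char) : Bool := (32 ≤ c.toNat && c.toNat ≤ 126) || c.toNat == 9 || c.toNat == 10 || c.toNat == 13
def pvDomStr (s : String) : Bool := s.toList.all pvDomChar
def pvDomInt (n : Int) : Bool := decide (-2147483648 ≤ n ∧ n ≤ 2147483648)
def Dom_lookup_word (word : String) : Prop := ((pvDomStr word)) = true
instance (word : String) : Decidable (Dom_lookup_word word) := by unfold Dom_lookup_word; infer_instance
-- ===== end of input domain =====

-- B replaces A's stateful scan over a dict-of-lists (found_one flag plus early break) by a flat
-- (keyword, category) pair table filtered once; the match count decides the answer. Objective: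
-- alternative (same behaviour and cost, different data structure).

-- ===== PORT A =====
-- the module-level 'lookup' dict of A
def lookupTable : List (String × List String) :=
  [("Destruction", ["crashed", "crash", "collided"]),
   ("Fire", ["fire", "fires"]),
   ("Laceration", ["laceration", "cut", "lacerated", "cutting"]),
   ("Electrical shock", ["electrical", "shock", "shocked"]),
   ("Tendon/ligament/muscle", ["ankle", "fell", "ankles", "disclocated", "twisted", "strain", "strained", "dislocated", "dislocation"]),
   ("Optical Damage", ["eye", "eyes", "eyelid", "eyelids", "shin", "shins"]),
   ("Skeletal Injury", ["broke", "fractured", "broken", "fracture"]),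
   ("Crushed Appendage", ["pinched", "jammed", "crushed", "crushing", "caught", "slammed", "dropped", "smashed"]),
   ("Burn", ["burn", "burns", "burned"]),
   ("Head Blow", ["face", "head", "concussion", "concussed", "slipped", "tripped"]),
   ("Appendage Blow", ["contusion", "tissue"]),
   ("Other Health", []),
   ("Human Damage", [])]

-- A's 'for key in lookup' loop with its found_one/the_word state and the 'break'
def lookupLoopA (word : String) : List (String × List String) → Bool → String → String
  | [], _, the_word => the_word
  | (key, ws) :: rest, found_one, the_word =>
    if ws.contains word && !found_one then lookupLoopA word rest true key
    else if ws.contains word && found_one then "MANUAL_ENTRY"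
    else lookupLoopA word rest found_one the_word

def lookup_word (word : String) : String := lookupLoopA word lookupTable false ""

-- ===== PORT B =====
-- B's module-level flat PAIRS table: (keyword, category)
def pvPairs : List (String × String) :=
  [("crashed", "Destruction"), ("crash", "Destruction"), ("collided", "Destruction"),
   ("fire", "Fire"), ("fires", "Fire"),
   ("laceration", "Laceration"), ("cut", "Laceration"), ("lacerated", "Laceration"), ("cutting", "Laceration"),
   ("electrical", "Electrical shock"), ("shock", "Electrical shock"), ("shocked", "Electrical shock"),
   ("ankle", "Tendon/ligament/muscle"), ("fell", "Tendon/ligament/muscle"), ("ankles", "Tendon/ligament/muscle"),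
   ("disclocated", "Tendon/ligament/muscle"), ("twisted", "Tendon/ligament/muscle"), ("strain", "Tendon/ligament/muscle"),
   ("strained", "Tendon/ligament/muscle"), ("dislocated", "Tendon/ligament/muscle"), ("dislocation", "Tendon/ligament/muscle"),
   ("eye", "Optical Damage"), ("eyes", "Optical Damage"), ("eyelid", "Optical Damage"),
   ("eyelids", "Optical Damage"), ("shin", "Optical Damage"), ("shins", "Optical Damage"),
   ("broke", "Skeletal Injury"), ("fractured", "Skeletal Injury"), ("broken", "Skeletal Injury"), ("fracture", "Skeletal Injury"),
   ("pinched", "Crushed Appendage"), ("jammed", "Crushed Appendage"), ("crushed", "Crushed Appendage"),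
   ("crushing", "Crushed Appendage"), ("caught", "Crushed Appendage"), ("slammed", "Crushed Appendage"),
   ("dropped", "Crushed Appendage"), ("smashed", "Crushed Appendage"),
   ("burn", "Burn"), ("burns", "Burn"), ("burned", "Burn"),
   ("face", "Head Blow"), ("head", "Head Blow"), ("concussion", "Head Blow"),
   ("concussed", "Head Blow"), ("slipped", "Head Blow"), ("tripped", "Head Blow"),
   ("contusion", "Appendage Blow"), ("tissue", "Appendage Blow")]

def lookup_word_alt (word : String) : String :=
  match (pvPairs.filter (fun p => p.1 == word)).map Prod.snd with
  | [] => ""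
  | [c] => c
  | _ => "MANUAL_ENTRY"

-- ===== PRECONDITION & SPEC =====
def Spec_lookup_word (word : String) (out : String) : Prop := out = lookup_word_alt word
instance (word : String) (out : String) : Decidable (Spec_lookup_word word out) := by unfold Spec_lookup_word; infer_instance

-- ===== CLAIM (what is proved, stated in full; the proofs are below) =====
def Claim_equal_lookup_word : Prop := ∀ (word : String), Dom_lookup_word word → Spec_lookup_word word (lookup_word word)

-- ===== LEMMAS AND PROOFS =====
-- the categories whose word list contains 'word', in table order
def pvMatched (word : String) (t : List (String × List String)) : List String :=
  (t.filter (fun kv => kv.2.contains word)).map Prod.fst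

theorem pvMatched_cons_pos (word k : String) (ws : List String)
    (rest : List (String × List String)) (h : word ∈ ws) :
    pvMatched word ((k, ws) :: rest) = k :: pvMatched word rest := by
  simp [pvMatched, h]

theorem pvMatched_cons_neg (word k : String) (ws : List String)
    (rest : List (String × List String)) (h : word ∉ ws) :
    pvMatched word ((k, ws) :: rest) = pvMatched word rest := by
  simp [pvMatched, h]

-- once found_one is set, any further match yields MANUAL_ENTRY, otherwise the held word survives
theorem loopA_found (word : String) (t : List (String × List String)) (acc : String) :
    lookupLoopA word t true acc =
      if pvMatched word t = [] then acc else "MANUAL_ENTRY" := by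
  induction t with
  | nil => simp [lookupLoopA, pvMatched]
  | cons kv rest ih =>
    obtain ⟨k, ws⟩ := kv
    by_cases h : word ∈ ws
    · rw [pvMatched_cons_pos word k ws rest h]
      simp [lookupLoopA, h]
    · rw [pvMatched_cons_neg word k ws rest h]
      simp [lookupLoopA, h, ih]

-- A's loop from the initial state, characterised by the matched-category list
theorem loopA_spec (word : String) (t : List (String × List String)) (acc : String) :
    lookupLoopA word t false acc =
      match pvMatched word t with
      | [] => acc
      | [k] => k
      | _ => "MANUAL_ENTRY" := by
  induction t generalizing acc with
  | nil => simp [lookupLoopA, pvMatched]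
  | cons kv rest ih =>
    obtain ⟨k, ws⟩ := kv
    by_cases h : word ∈ ws
    · rw [pvMatched_cons_pos word k ws rest h]
      simp only [lookupLoopA]
      rw [if_pos (by simp [h]), loopA_found]
      cases hr : pvMatched word rest with
      | nil => simp
      | cons a l => simp
    · rw [pvMatched_cons_neg word k ws rest h]
      simp only [lookupLoopA]
      rw [if_neg (by simp [h]), if_neg (by simp [h])]
      exact ih acc

-- B's flat table is the flattening of A's table into (word, category) pairs
set_option maxRecDepth 4000 in
theorem pvPairs_eq_flat :
    pvPairs = lookupTable.flatMap (fun kv => kv.2.map (fun w => (w, kv.1))) := by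
  decide

-- filtering the pairs of one category: with a duplicate-free word list, at most one hit
theorem filter_pairs_of_nodup (word k : String) (ws : List String) (h : ws.Nodup) :
    ((ws.map (fun w => (w, k))).filter (fun p => p.1 == word)).map Prod.snd
      = if ws.contains word then [k] else [] := by
  induction ws with
  | nil => simp
  | cons w ws' ih =>
    simp only [List.nodup_cons] at h
    by_cases hw : w = word
    · subst hw
      have hnil : (ws'.map (fun x => (x, k))).filter (fun p => p.1 == w) = [] :=
        List.filter_eq_nil_iff.mpr (by
          intro p hp
          simp only [List.mem_map] at hp
          obtain ⟨x, hx, rfl⟩ := hp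
          simp only [beq_iff_eq]
          rintro rfl
          exact h.1 hx)
      simp [hnil]
    · simp [hw, ih h.2, Ne.symm hw]

-- the filtered flat table equals the matched-category list
theorem flat_filter_eq_matched (word : String) (t : List (String × List String))
    (h : ∀ kv ∈ t, kv.2.Nodup) :
    ((t.flatMap (fun kv => kv.2.map (fun w => (w, kv.1)))).filter (fun p => p.1 == word)).map Prod.snd
      = pvMatched word t := by
  induction t with
  | nil => simp [pvMatched]
  | cons kv rest ih =>
    obtain ⟨k, ws⟩ := kv
    have hrest := ih (fun x hx => h x (by simp [hx]))
    rw [List.flatMap_cons, List.filter_append, List.map_append,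
        filter_pairs_of_nodup word k ws (h (k, ws) (by simp)), hrest]
    by_cases hc : word ∈ ws
    · rw [if_pos (by simpa using hc), pvMatched_cons_pos word k ws rest hc]; rfl
    · rw [if_neg (by simpa using hc), pvMatched_cons_neg word k ws rest hc]; rfl

set_option maxRecDepth 2000 in
theorem lookupTable_nodup : ∀ kv ∈ lookupTable, kv.2.Nodup := by
  intro kv h
  fin_cases h <;> decide

theorem lookup_word_eq_alt (word : String) : lookup_word word = lookup_word_alt word := by
  have hB : (pvPairs.filter (fun p => p.1 == word)).map Prod.snd = pvMatched word lookupTable := by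
    rw [pvPairs_eq_flat]
    exact flat_filter_eq_matched word lookupTable lookupTable_nodup
  rw [lookup_word, loopA_spec, lookup_word_alt, hB]

-- ===== VERDICT (by name: the statement is the Claim_ definition above) =====
theorem lookup_word_spec : Claim_equal_lookup_word := by
  intro word _
  exact lookup_word_eq_alt word
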